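-- pv_equiv track=rewrite | github.com/artvepa80/OMEGA | modules/performance_comparator.py | _has_unusual_pattern
-- ===== SOURCE A (Python) =====
-- from typing import Dict, List, Any, Tuple, Optional
--
-- def _has_unusual_pattern(numbers: List[int]) -> bool:
--     """Check for unusual patterns in number combinations."""
--     if len(numbers) < 3:
--         return False
--
--     # Check for arithmetic sequence
--     sorted_numbers = sorted(numbers)
--     diffs = [sorted_numbers[i+1] - sorted_numbers[i] for i in range(len(sorted_numbers)-1)]
--     if len(set(diffs)) == 1 and diffs[0] > 1:  # Consistent gap > 1
--         return True
--
--     # Check for all even or all odd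
--     if all(n % 2 == 0 for n in numbers) or all(n % 2 == 1 for n in numbers):
--         return True
--
--     return False
-- ===== SOURCE B (Python) =====
-- def _has_unusual_pattern(numbers):
--     """Closed-form arithmetic-progression test via min/max/set instead of sort-and-diff."""
--     n = len(numbers)
--     if n < 3:
--         return False
--     s = set(numbers)
--     mn = min(numbers)
--     mx = max(numbers)
--     span = mx - mn
--     if len(s) == n and span % (n - 1) == 0:
--         step = span // (n - 1)
--         if step > 1 and all((mn + i * step) in s for i in range(n)):
--             return True
--     if all(m % 2 == 0 for m in numbers) or all(m % 2 == 1 for m in numbers):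
--         return True
--     return False
-- ===== Notes on version B (the rewrite author's own statement) =====
-- stated objective: faster
-- what changed: The arithmetic-progression branch no longer sorts and scans successive differences: B computes min, max and the element set once and checks the closed-form condition span % (n-1) == 0, step > 1, all elements distinct and every mn + i*step present in the set.
import Mathlib
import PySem

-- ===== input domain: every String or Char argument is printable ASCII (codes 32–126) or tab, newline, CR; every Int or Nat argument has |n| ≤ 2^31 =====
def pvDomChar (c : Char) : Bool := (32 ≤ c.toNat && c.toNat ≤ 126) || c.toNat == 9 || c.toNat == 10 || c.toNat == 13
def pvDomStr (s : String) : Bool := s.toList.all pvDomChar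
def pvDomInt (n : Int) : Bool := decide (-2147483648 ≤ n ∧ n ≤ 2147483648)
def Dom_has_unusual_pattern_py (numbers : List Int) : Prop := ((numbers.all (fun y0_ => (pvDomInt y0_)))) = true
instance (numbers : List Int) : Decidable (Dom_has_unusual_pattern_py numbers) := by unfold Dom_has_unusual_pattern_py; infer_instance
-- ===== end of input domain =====

-- B replaces A's sort-and-constant-diff arithmetic check by a closed-form min/max/set test (no sort); objective: faster (measured).

-- ===== PORT A =====
def has_unusual_pattern_py (numbers : List Int) : Bool :=
  if numbers.length < 3 then false
  else
    let sorted_numbers := PySem.List.sorted numbers (fun x => x) false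
    -- indices i and i+1 are in range for i < len-1, so getD is exact here
    let diffs := (List.range (sorted_numbers.length - 1)).map
      (fun i => sorted_numbers.getD (i + 1) 0 - sorted_numbers.getD i 0)
    -- diffs[0]: diffs is nonempty (len ≥ 3), so headD is exact
    if (PySem.Set.ofList diffs).length == 1 && decide (1 < diffs.headD 0) then
      true
    else if numbers.all (fun n => PySem.Int.mod n 2 == 0)
         || numbers.all (fun n => PySem.Int.mod n 2 == 1) then
      true
    else false

-- ===== PORT B =====
def has_unusual_pattern_py_alt (numbers : List Int) : Bool :=
  let n := numbers.length
  if n < 3 then false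
  else
    let s := PySem.Set.ofList numbers
    -- numbers is nonempty here, so min/max are exact via getD
    let mn := (PySem.List.min? numbers (fun x => x)).getD 0
    let mx := (PySem.List.max? numbers (fun x => x)).getD 0
    let span := mx - mn
    if PySem.Set.len s == (n : Int) && PySem.Int.mod span ((n : Int) - 1) == 0
        && decide (1 < PySem.Int.floordiv span ((n : Int) - 1))
        && (List.range n).all (fun i =>
             PySem.Set.contains s (mn + (i : Int) * PySem.Int.floordiv span ((n : Int) - 1))) then
      true
    else if numbers.all (fun m => PySem.Int.mod m 2 == 0)
         || numbers.all (fun m => PySem.Int.mod m 2 == 1) then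
      true
    else false

-- ===== PRECONDITION & SPEC =====
def Spec_has_unusual_pattern_py (numbers : List Int) (out : Bool) : Prop := out = has_unusual_pattern_py_alt numbers
instance (numbers : List Int) (out : Bool) : Decidable (Spec_has_unusual_pattern_py numbers out) := by unfold Spec_has_unusual_pattern_py; infer_instance

-- ===== CLAIM (what is proved, stated in full; the proofs are below) =====
def Claim_equal_has_unusual_pattern_py : Prop := ∀ (numbers : List Int), Dom_has_unusual_pattern_py numbers → Spec_has_unusual_pattern_py numbers (has_unusual_pattern_py numbers)

-- ===== LEMMAS AND PROOFS =====

-- the successive differences of a list (A's diffs)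
def pvDiffs (l : List Int) : List Int :=
  (List.range (l.length - 1)).map (fun i => l.getD (i + 1) 0 - l.getD i 0)

-- A's arithmetic-branch condition
def pvCondA (numbers : List Int) : Bool :=
  (PySem.Set.ofList (pvDiffs (PySem.List.sorted numbers (fun x => x) false))).length == 1
    && decide (1 < (pvDiffs (PySem.List.sorted numbers (fun x => x) false)).headD 0)

-- B's arithmetic-branch condition
def pvCondB (numbers : List Int) : Bool :=
  PySem.Set.len (PySem.Set.ofList numbers) == (numbers.length : Int)
    && PySem.Int.mod ((PySem.List.max? numbers (fun x => x)).getD 0 - (PySem.List.min? numbers (fun x => x)).getD 0) ((numbers.length : Int) - 1) == 0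
    && decide (1 < PySem.Int.floordiv ((PySem.List.max? numbers (fun x => x)).getD 0 - (PySem.List.min? numbers (fun x => x)).getD 0) ((numbers.length : Int) - 1))
    && (List.range numbers.length).all (fun i =>
         PySem.Set.contains (PySem.Set.ofList numbers)
           ((PySem.List.min? numbers (fun x => x)).getD 0 + (i : Int) * PySem.Int.floordiv ((PySem.List.max? numbers (fun x => x)).getD 0 - (PySem.List.min? numbers (fun x => x)).getD 0) ((numbers.length : Int) - 1)))

theorem mem_pvDiffs {l : List Int} {x : Int} :
    x ∈ pvDiffs l ↔ ∃ i, i < l.length - 1 ∧ x = l.getD (i + 1) 0 - l.getD i 0 := by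
  simp only [pvDiffs, List.mem_map, List.mem_range]
  constructor
  · rintro ⟨i, hi, rfl⟩; exact ⟨i, hi, rfl⟩
  · rintro ⟨i, hi, rfl⟩; exact ⟨i, hi, rfl⟩

theorem ofList_length_eq_one_iff {xs : List Int} (hne : xs ≠ []) :
    (PySem.Set.ofList xs).length = 1 ↔ ∀ x ∈ xs, x = xs.headD 0 := by
  obtain ⟨a, t, rfl⟩ := List.exists_cons_of_ne_nil hne
  constructor
  · intro h x hx
    obtain ⟨d, hd⟩ := List.length_eq_one_iff.mp h
    have hmem : ∀ y, y ∈ (a :: t) → y = d := by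
      intro y hy
      have : y ∈ PySem.Set.ofList (a :: t) := (PySem.Set.mem_ofList _ _).mpr hy
      rw [hd] at this; simpa using this
    rw [hmem x hx, List.headD_cons, hmem a (List.mem_cons_self)]
  · intro h
    have hall : ∀ y ∈ PySem.Set.ofList (a :: t), y = a := by
      intro y hy
      have := (PySem.Set.mem_ofList _ _).mp hy
      simpa using h y this
    have hane : a ∈ PySem.Set.ofList (a :: t) :=
      (PySem.Set.mem_ofList _ _).mpr List.mem_cons_self
    have hnd := PySem.Set.nodup_ofList (a :: t)
    cases hS : PySem.Set.ofList (a :: t) with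
    | nil => rw [hS] at hane; simp at hane
    | cons b u =>
      rw [hS] at hall hnd
      cases u with
      | nil => simp
      | cons c v =>
        have hb : b = a := hall b List.mem_cons_self
        have hc : c = a := hall c (by simp)
        rw [List.nodup_cons] at hnd
        exact absurd (by simp [hb, hc]) hnd.1

theorem affine_of_diffs {l : List Int} {d : Int}
    (h : ∀ i, i < l.length - 1 → l.getD (i + 1) 0 - l.getD i 0 = d) :
    ∀ i, i < l.length → l.getD i 0 = l.getD 0 0 + (i : Int) * d := by
  intro i
  induction i with
  | zero => intro _; simp
  | succ k ih =>
    intro hk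
    have h1 := ih (by omega)
    have h2 := h k (by omega)
    push_cast
    linarith

theorem cond_eq (numbers : List Int) (h3 : 3 ≤ numbers.length) :
    pvCondA numbers = pvCondB numbers := by
  have hne : numbers ≠ [] := by
    intro h; rw [h] at h3; simp at h3
  obtain ⟨mn, hmn⟩ : ∃ m, PySem.List.min? numbers (fun x => x) = some m := by
    cases h : PySem.List.min? numbers (fun x => x) with
    | none => exact absurd ((PySem.List.min?_eq_none_iff _ _).mp h) hne
    | some m => exact ⟨m, rfl⟩
  obtain ⟨mx, hmx⟩ : ∃ m, PySem.List.max? numbers (fun x => x) = some m := by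
    cases h : PySem.List.max? numbers (fun x => x) with
    | none => exact absurd ((PySem.List.max?_eq_none_iff _ _).mp h) hne
    | some m => exact ⟨m, rfl⟩
  have hperm : (PySem.List.sorted numbers (fun x => x) false).Perm numbers :=
    PySem.List.sorted_perm numbers (fun x => x) false
  set l := PySem.List.sorted numbers (fun x => x) false with hldef
  have hlen : l.length = numbers.length := hperm.length_eq
  have hmeml : ∀ x, x ∈ l ↔ x ∈ numbers := fun x => hperm.mem_iff
  rw [Bool.eq_iff_iff]
  simp only [pvCondA, pvCondB, ← hldef, Bool.and_eq_true, beq_iff_eq, decide_eq_true_eq,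
    List.all_eq_true, List.mem_range, hmn, hmx, Option.getD_some, PySem.Set.len,
    PySem.Set.contains_iff, PySem.Set.mem_ofList, Int.natCast_inj]
  have hDlen : (pvDiffs l).length = numbers.length - 1 := by simp [pvDiffs, hlen]
  have hDne : pvDiffs l ≠ [] := by
    intro hnil; rw [hnil] at hDlen; simp at hDlen; omega
  constructor
  · rintro ⟨h1, hd⟩
    set d := (pvDiffs l).headD 0 with hddef
    have hd0 : (0 : Int) < d := by omega
    have hall : ∀ x ∈ pvDiffs l, x = d := (ofList_length_eq_one_iff hDne).mp h1
    have hdiff : ∀ i, i < l.length - 1 → l.getD (i + 1) 0 - l.getD i 0 = d := by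
      intro i hi; exact hall _ (mem_pvDiffs.mpr ⟨i, hi, rfl⟩)
    have haff := affine_of_diffs hdiff
    set a := l.getD 0 0 with hadef
    have hgetmem : ∀ i, i < l.length → l.getD i 0 ∈ numbers := by
      intro i hi
      rw [← hmeml, List.getD_eq_getElem l 0 hi]
      exact List.getElem_mem hi
    have hmnval : mn = a := by
      have hle1 : mn ≤ a := PySem.List.min?_isMin hmn a (hgetmem 0 (by omega))
      have hle2 : a ≤ mn := by
        have hm : mn ∈ l := (hmeml mn).mpr (PySem.List.min?_mem hmn)
        obtain ⟨i, hi, hEq⟩ := List.mem_iff_getElem.mp hm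
        have hv : mn = l.getD i 0 := by rw [List.getD_eq_getElem l 0 hi, hEq]
        have hnn : (0 : Int) ≤ (i : Int) * d := by positivity
        rw [hv, haff i hi]; omega
      omega
    have hmxval : mx = a + ((numbers.length : Int) - 1) * d := by
      have hidx : numbers.length - 1 < l.length := by omega
      have hb : l.getD (numbers.length - 1) 0 = a + ((numbers.length : Int) - 1) * d := by
        rw [haff _ hidx]
        have hc : ((numbers.length - 1 : Nat) : Int) = (numbers.length : Int) - 1 := by omega
        rw [hc]
      have hle1 : l.getD (numbers.length - 1) 0 ≤ mx :=
        PySem.List.max?_isMax hmx _ (hgetmem _ hidx)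
      have hle2 : mx ≤ a + ((numbers.length : Int) - 1) * d := by
        have hm : mx ∈ l := (hmeml mx).mpr (PySem.List.max?_mem hmx)
        obtain ⟨i, hi, hEq⟩ := List.mem_iff_getElem.mp hm
        have hv : mx = l.getD i 0 := by rw [List.getD_eq_getElem l 0 hi, hEq]
        have hmul : (i : Int) * d ≤ ((numbers.length : Int) - 1) * d := by
          apply mul_le_mul_of_nonneg_right _ hd0.le
          omega
        rw [hv, haff i hi]; omega
      omega
    have hspan : mx - mn = ((numbers.length : Int) - 1) * d := by
      rw [hmnval, hmxval]; ring
    have hfd : PySem.Int.floordiv (mx - mn) ((numbers.length : Int) - 1) = d := by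
      rw [hspan, PySem.Int.floordiv_eq_ediv_of_pos (by omega),
        Int.mul_ediv_cancel_left _ (by omega)]
    refine ⟨⟨⟨?_, ?_⟩, ?_⟩, ?_⟩
    · have hnodup : numbers.Nodup := by
        have hpl : l.Pairwise (· < ·) := by
          rw [List.pairwise_iff_getElem]
          intro i j hi hj hij
          have h1 := haff i (by omega)
          have h2 := haff j hj
          rw [List.getD_eq_getElem l 0 hi] at h1
          rw [List.getD_eq_getElem l 0 hj] at h2
          have hmul : (i : Int) * d < (j : Int) * d := by
            apply mul_lt_mul_of_pos_right _ hd0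
            exact_mod_cast hij
          omega
        exact hperm.nodup_iff.mp (hpl.imp fun h => ne_of_lt h)
      rw [PySem.Set.ofList_eq_self_of_nodup numbers hnodup]
    · rw [hspan, PySem.Int.mod_eq_zero_iff_dvd]
      exact Dvd.intro d rfl
    · rw [hfd]; omega
    · intro i hi
      rw [hfd, hmnval]
      have := haff i (by omega)
      rw [← this]
      exact hgetmem i (by omega)
  · rintro ⟨⟨⟨hlen1, hmod⟩, hdlt⟩, hmem⟩
    set d := PySem.Int.floordiv (mx - mn) ((numbers.length : Int) - 1) with hddef
    have hd0 : (0 : Int) < d := by omega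
    set ys := (List.range numbers.length).map (fun i : Nat => mn + (i : Int) * d) with hysdef
    have hyslen : ys.length = numbers.length := by simp [hysdef]
    have hyspw : ys.Pairwise (· < ·) := by
      rw [hysdef, List.pairwise_map]
      apply List.Pairwise.imp _ List.pairwise_lt_range
      intro i j hij
      have hcast : (i : Int) < (j : Int) := by exact_mod_cast hij
      have := mul_lt_mul_of_pos_right hcast hd0
      omega
    have hysnd : ys.Nodup := hyspw.imp fun h => ne_of_lt h
    have hsub : ys ⊆ numbers := by
      rw [hysdef]; intro x hx
      simp only [List.mem_map, List.mem_range] at hx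
      obtain ⟨i, hi, rfl⟩ := hx
      exact hmem i hi
    have hperm2 : ys.Perm numbers := (hysnd.subperm hsub).perm_of_length_le (by omega)
    have hsl : l = ys :=
      PySem.List.sorted_eq_of_perm_of_pairwise_lt numbers ys (fun x => x) hperm2 hyspw
    have hgys : ∀ i, i < numbers.length → ys.getD i 0 = mn + (i : Int) * d := by
      intro i hi
      rw [hysdef, List.getD_eq_getElem _ 0 (by simpa using hi)]
      simp
    have hdiffval : ∀ i, i < numbers.length - 1 → l.getD (i + 1) 0 - l.getD i 0 = d := by
      intro i hi
      rw [hsl, hgys (i + 1) (by omega), hgys i (by omega)]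
      push_cast; ring
    have hall : ∀ x ∈ pvDiffs l, x = d := by
      intro x hx
      obtain ⟨i, hi, rfl⟩ := mem_pvDiffs.mp hx
      exact hdiffval i (by omega)
    have hhead : (pvDiffs l).headD 0 = d := by
      have hh : (pvDiffs l).headD 0 ∈ pvDiffs l := by
        cases hD : pvDiffs l with
        | nil => exact absurd hD hDne
        | cons b u => simp
      exact hall _ hh
    constructor
    · rw [ofList_length_eq_one_iff hDne]
      intro x hx
      rw [hall x hx, hhead]
    · rw [hhead]; exact hdlt

theorem main_eq (numbers : List Int) :
    has_unusual_pattern_py numbers = has_unusual_pattern_py_alt numbers := by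
  by_cases h : numbers.length < 3
  · simp [has_unusual_pattern_py, has_unusual_pattern_py_alt, h]
  · have harith := cond_eq numbers (by omega)
    simp only [pvCondA, pvCondB, pvDiffs, PySem.List.length_sorted] at harith
    simp only [has_unusual_pattern_py, has_unusual_pattern_py_alt, if_neg h, PySem.List.length_sorted]
    rw [harith]
-- ===== VERDICT (by name: the statement is the Claim_ definition above) =====
theorem has_unusual_pattern_py_spec : Claim_equal_has_unusual_pattern_py := by
  intro numbers _
  unfold Spec_has_unusual_pattern_py
  exact main_eq numbers
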